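-- pv_equiv track=rewrite | github.com/dani0f/mail-extraction-regex-analisis | regex.py | dif
-- ===== SOURCE A (Python) =====
-- def dif(str1,str2):
--     minS = str1
--     maxS = str2
--     if(len(str1) > len(str2)):
--         minS=str2
--         maxS=str1
--     num = len(minS)
--     for i in range(num):
--         maxS=maxS.replace(minS[i],"", 1)
--     return(maxS)
-- ===== SOURCE B (Python) =====
-- def dif(str1, str2):
--     if len(str1) > len(str2):
--         minS, maxS = str2, str1
--     else:
--         minS, maxS = str1, str2
--     budget = {}
--     for c in minS:
--         budget[c] = budget.get(c, 0) + 1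
--     out = []
--     for c in maxS:
--         n = budget.get(c, 0)
--         if n:
--             budget[c] = n - 1
--         else:
--             out.append(c)
--     return "".join(out)
-- ===== Notes on version B (the rewrite author's own statement) =====
-- stated objective: faster
-- what changed: Replaces the per-character str.replace loop (each replace rescans the long string) with a character-count budget dict built from the short string and a single pass over the long string that skips each char while its budget lasts.
import Mathlib
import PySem

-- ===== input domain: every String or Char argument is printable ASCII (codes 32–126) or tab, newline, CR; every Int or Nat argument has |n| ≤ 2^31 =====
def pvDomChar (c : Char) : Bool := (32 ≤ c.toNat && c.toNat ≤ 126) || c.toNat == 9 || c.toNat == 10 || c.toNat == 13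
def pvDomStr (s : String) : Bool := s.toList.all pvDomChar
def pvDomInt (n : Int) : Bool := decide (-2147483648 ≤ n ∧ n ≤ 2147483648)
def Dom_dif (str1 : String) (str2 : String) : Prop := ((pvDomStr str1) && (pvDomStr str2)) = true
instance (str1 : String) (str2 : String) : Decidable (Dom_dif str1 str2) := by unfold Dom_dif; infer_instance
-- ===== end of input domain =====

-- B replaces A's per-character str.replace loop by a count-budget dict and one pass over the longer string (faster).


-- ===== PORT A =====
-- hand port of maxS.replace(old, "", 1) for the ONE-CHARACTER old string minS[i]:
-- removes the first occurrence of that character; exact for this call.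
def pvRemoveFirst : List Char → Char → List Char
  | [], _ => []
  | d :: t, c => if d = c then t else d :: pvRemoveFirst t c

def dif (str1 : String) (str2 : String) : String :=
  let minS := if PySem.Str.len str1 > PySem.Str.len str2 then str2 else str1
  let maxS := if PySem.Str.len str1 > PySem.Str.len str2 then str1 else str2
  let num := PySem.Str.len minS
  String.ofList ((PySem.List.pyRange 0 num 1).foldl
    (fun acc i => pvRemoveFirst acc (PySem.List.pyGetD minS.toList i ' ')) maxS.toList)

-- ===== PORT B =====
-- ''.join(out) over single characters is exactly String.ofList of the character list.
def dif_alt (str1 : String) (str2 : String) : String :=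
  let minS := if PySem.Str.len str1 > PySem.Str.len str2 then str2 else str1
  let maxS := if PySem.Str.len str1 > PySem.Str.len str2 then str1 else str2
  let budget := minS.toList.foldl (fun d c => d.insert c (d.getD c 0 + 1)) PySem.Dict.empty
  let res := maxS.toList.foldl
    (fun (p : List Char × PySem.Dict Char Int) c =>
      let n := p.2.getD c 0
      if n ≠ 0 then (p.1, p.2.insert c (n - 1)) else (p.1 ++ [c], p.2))
    (([] : List Char), budget)
  String.ofList res.1

-- ===== PRECONDITION & SPEC =====
def Spec_dif (str1 : String) (str2 : String) (out : String) : Prop := out = dif_alt str1 str2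
instance (str1 : String) (str2 : String) (out : String) : Decidable (Spec_dif str1 str2 out) := by unfold Spec_dif; infer_instance

-- ===== CLAIM (what is proved, stated in full; the proofs are below) =====
def Claim_equal_dif : Prop := ∀ (str1 : String) (str2 : String), Dom_dif str1 str2 → Spec_dif str1 str2 (dif str1 str2)

-- ===== LEMMAS AND PROOFS =====

-- budget-scan with a FUNCTION budget (proof abstraction of B's pass)
def pvScan : (Char → Int) → List Char → List Char
  | _, [] => []
  | b, d :: t => if b d ≠ 0 then pvScan (fun x => if x = d then b d - 1 else b x) t else d :: pvScan b t

theorem pvScan_zero (b : Char → Int) (s : List Char) (hb : ∀ x, b x = 0) : pvScan b s = s := by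
  induction s with
  | nil => rfl
  | cons d t ih => simp [pvScan, hb d, ih]

theorem pvScan_bump (c : Char) (s : List Char) : ∀ (b : Char → Int), (∀ x, 0 ≤ b x) →
    pvScan (fun x => if x = c then b x + 1 else b x) s = pvScan b (pvRemoveFirst s c) := by
  induction s with
  | nil => intro b _; rfl
  | cons d t ih =>
    intro b hb
    by_cases hdc : d = c
    · subst hdc
      have h1 : ¬ (b d + 1 = 0) := by have := hb d; omega
      simp [pvScan, pvRemoveFirst, h1]
      congr 1
      funext x
      by_cases hx : x = d <;> simp [hx]
    · have hcd : ¬ c = d := fun h => hdc h.symm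
      by_cases h1 : b d = 0
      · simp [pvScan, pvRemoveFirst, hdc, h1, ih b hb]
      · simp only [pvScan, pvRemoveFirst, if_neg hdc]
        rw [if_pos h1, if_pos h1]
        have heq : (fun x => if x = d then b d - 1 else if x = c then b x + 1 else b x)
            = (fun x => if x = c then (fun y => if y = d then b d - 1 else b y) x + 1
                        else (fun y => if y = d then b d - 1 else b y) x) := by
          funext x
          by_cases hx : x = d
          · subst hx; simp [hdc]
          · by_cases hxc : x = c <;> simp [hx, hxc, hcd]
        rw [heq, ih (fun y => if y = d then b d - 1 else b y)
              (by intro y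
                  by_cases hy : y = d
                  · subst hy; simp; have := hb y; omega
                  · simp [hy]; exact hb y)]

theorem pvFoldA_eq_scan (minL : List Char) : ∀ (maxL : List Char),
    minL.foldl pvRemoveFirst maxL = pvScan (fun c => (minL.count c : Int)) maxL := by
  induction minL with
  | nil =>
    intro maxL
    simp only [List.foldl_nil]
    rw [pvScan_zero _ _ (by intro x; simp)]
  | cons c rest ih =>
    intro maxL
    simp only [List.foldl_cons]
    rw [ih (pvRemoveFirst maxL c), ← pvScan_bump c maxL (fun x => (rest.count x : Int)) (by intro x; positivity)]
    congr 1
    funext x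
    by_cases hx : x = c
    · subst hx; simp
    · simp [hx, Ne.symm hx]

theorem pvFoldB_eq_scan (maxL : List Char) : ∀ (out : List Char) (d : PySem.Dict Char Int),
    (maxL.foldl
      (fun (p : List Char × PySem.Dict Char Int) c =>
        let n := p.2.getD c 0
        if n ≠ 0 then (p.1, p.2.insert c (n - 1)) else (p.1 ++ [c], p.2))
      (out, d)).1 = out ++ pvScan (fun c => d.getD c 0) maxL := by
  induction maxL with
  | nil => intro out d; simp [pvScan]
  | cons c t ih =>
    intro out d
    simp only [List.foldl_cons]
    by_cases h0 : d.getD c 0 ≠ 0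
    · simp only [pvScan, if_pos h0]
      rw [ih out (d.insert c (d.getD c 0 - 1))]
      congr 2
      funext x
      rw [PySem.Dict.getD_insert]
    · simp only [pvScan, h0, ite_false]
      rw [ih (out ++ [c]) d, List.append_assoc]
      rfl

theorem pvCounter_getD (minL : List Char) (c : Char) :
    (minL.foldl (fun d c => d.insert c (d.getD c 0 + 1)) PySem.Dict.empty).getD c 0
      = (minL.count c : Int) := by
  rw [PySem.Dict.getD_foldl_insert_add_one]
  simp

theorem dif_core (minL maxL : List Char) :
    (maxL.foldl
      (fun (p : List Char × PySem.Dict Char Int) c =>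
        let n := p.2.getD c 0
        if n ≠ 0 then (p.1, p.2.insert c (n - 1)) else (p.1 ++ [c], p.2))
      (([] : List Char), minL.foldl (fun d c => d.insert c (d.getD c 0 + 1)) PySem.Dict.empty)).1
    = minL.foldl pvRemoveFirst maxL := by
  rw [pvFoldB_eq_scan, pvFoldA_eq_scan]
  simp only [List.nil_append]
  congr 1
  funext x
  exact pvCounter_getD minL x

-- ===== VERDICT (by name: the statement is the Claim_ definition above) =====
theorem dif_spec : Claim_equal_dif := by
  intro str1 str2 _
  unfold Spec_dif dif dif_alt
  simp only []
  set minS := if PySem.Str.len str1 > PySem.Str.len str2 then str2 else str1 with hmin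
  set maxS := if PySem.Str.len str1 > PySem.Str.len str2 then str1 else str2 with hmax
  have hnum : PySem.Str.len minS = (minS.toList.length : Int) := by
    simp [PySem.Str.len_eq]
  rw [hnum, ← PySem.List.len_eq,
      PySem.List.foldl_pyRange_zero_pyGetD minS.toList ' ' pvRemoveFirst maxS.toList]
  rw [dif_core]
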